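-- pv_equiv track=rewrite | github.com/tobiaspontes/ScriptsPython | Coursera/Criar matriz.py | cria_matriz
-- ===== SOURCE A (Python) =====
-- def cria_matriz(num_linhas, num_colunas):
--     ''' Esta função cria uma matriz (num_linhas x num_colunas)
--     e preenche com o valor dado pela multiplicação do número da linha pelo número da coluna.'''
--     matriz = [] # lista vazia
--     for i in range(num_linhas):
--         linha = [] # lista vazia
--         for j in range(num_colunas):
--             linha.append((i+1) * (1+j)) # valores da matriz: produto do número da linha x número da coluna
--         matriz.append(linha) # adiciona linha à matriz
--     return matriz
-- ===== SOURCE B (Python) =====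
-- def cria_matriz(num_linhas, num_colunas):
--     matriz = []
--     if num_linhas > 0:
--         base = list(range(1, num_colunas + 1))
--         matriz.append(base)
--         row = base
--         for _ in range(num_linhas - 1):
--             row = [a + b for a, b in zip(row, base)]
--             matriz.append(row)
--     return matriz
-- ===== Notes on version B (the rewrite author's own statement) =====
-- stated objective: alternative
-- what changed: B builds the first row once and derives every subsequent row by element-wise ADDITION of the previous row with the base row (an additive recurrence row_i = row_{i-1} + base), instead of A's nested loops computing each cell's product (i+1)*(j+1) independently.
import Mathlib
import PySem

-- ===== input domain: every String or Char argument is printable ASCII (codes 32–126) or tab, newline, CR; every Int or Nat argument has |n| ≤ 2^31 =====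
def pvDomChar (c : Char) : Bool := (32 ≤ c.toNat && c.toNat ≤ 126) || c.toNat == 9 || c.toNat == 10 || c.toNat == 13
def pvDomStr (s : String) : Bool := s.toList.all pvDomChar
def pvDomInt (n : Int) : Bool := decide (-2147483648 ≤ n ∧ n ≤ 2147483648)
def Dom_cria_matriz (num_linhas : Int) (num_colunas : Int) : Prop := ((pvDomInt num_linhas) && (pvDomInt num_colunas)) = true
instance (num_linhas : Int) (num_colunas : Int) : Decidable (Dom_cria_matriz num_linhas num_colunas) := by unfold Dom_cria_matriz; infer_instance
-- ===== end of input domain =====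

-- B builds the first row once and derives each next row by element-wise addition with it (additive recurrence), vs A's nested product loops; same cost, different algorithm.


-- ===== PORT A =====
def cria_matriz (num_linhas : Int) (num_colunas : Int) : List (List Int) :=
  (PySem.List.pyRange 0 num_linhas 1).foldl
    (fun matriz i =>
      let linha := (PySem.List.pyRange 0 num_colunas 1).foldl
        (fun linha j => linha ++ [(i + 1) * (1 + j)]) []
      matriz ++ [linha]) []

-- ===== PORT B =====
def cria_matriz_alt (num_linhas : Int) (num_colunas : Int) : List (List Int) :=
  if num_linhas > 0 then
    let base := PySem.List.pyRange 1 (num_colunas + 1) 1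
    let st := (PySem.List.pyRange 0 (num_linhas - 1) 1).foldl
      (fun (st : List (List Int) × List Int) _ =>
        let row := List.zipWith (· + ·) st.2 base
        (st.1 ++ [row], row)) ([base], base)
    st.1
  else []

-- ===== PRECONDITION & SPEC =====
def Spec_cria_matriz (num_linhas : Int) (num_colunas : Int) (out : List (List Int)) : Prop := out = cria_matriz_alt num_linhas num_colunas
instance (num_linhas : Int) (num_colunas : Int) (out : List (List Int)) : Decidable (Spec_cria_matriz num_linhas num_colunas out) := by unfold Spec_cria_matriz; infer_instance

-- ===== CLAIM =====
def Claim_equal_cria_matriz : Prop := ∀ (num_linhas : Int) (num_colunas : Int), Dom_cria_matriz num_linhas num_colunas → Spec_cria_matriz num_linhas num_colunas (cria_matriz num_linhas num_colunas)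

-- ===== LEMMAS AND PROOFS =====

-- A's append loop is a map (specific shape; reused for both the outer and inner loop of A).
theorem pv_foldl_push {α β : Type} (f : α → β) : ∀ (l : List α) (acc : List β),
    l.foldl (fun m i => m ++ [f i]) acc = acc ++ l.map f := by
  intro l
  induction l with
  | nil => simp
  | cons x xs ih => intro acc; simp [List.foldl, ih]

-- Row i of the multiplication table, as B's scaling of the base row.
def pvRow (base : List Int) (i : Nat) : List Int := base.map (fun x => ((i : Int) + 1) * x)

theorem pvRow_step (base : List Int) (i : Nat) :
    List.zipWith (· + ·) (pvRow base i) base = pvRow base (i + 1) := by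
  simp only [pvRow, List.zipWith_map_left, List.zipWith_self]
  apply List.map_congr_left
  intro x _
  push_cast
  ring

-- B's fold invariant: starting from row i, k more steps append rows i+1 … i+k.
theorem pv_fold_rows (base : List Int) : ∀ (l : List Int) (acc : List (List Int)) (i : Nat),
    l.foldl
      (fun (st : List (List Int) × List Int) _ =>
        (st.1 ++ [List.zipWith (· + ·) st.2 base], List.zipWith (· + ·) st.2 base))
      (acc, pvRow base i)
    = (acc ++ (List.range l.length).map (fun t => pvRow base (i + 1 + t)), pvRow base (i + l.length)) := by
  intro l
  induction l with
  | nil => intro acc i; simp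
  | cons x xs ih =>
    intro acc i
    simp only [List.foldl_cons, pvRow_step]
    rw [ih (acc ++ [pvRow base (i + 1)]) (i + 1)]
    rw [Prod.mk.injEq]
    constructor
    · rw [List.append_assoc, List.length_cons, List.range_succ_eq_map]
      have hf : (fun t : Nat => pvRow base (i + 1 + (t + 1))) = (fun t => pvRow base (i + 1 + 1 + t)) := by
        funext t; congr 1; omega
      simp only [List.map_cons, List.map_map, List.singleton_append, Function.comp_def, hf,
        Nat.add_zero]
    · congr 1
      simp only [List.length_cons]
      omega

-- Specialisation to B's actual initial state ([base], base).
theorem pv_fold_rows0 (base : List Int) (l : List Int) :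
    (l.foldl
      (fun (st : List (List Int) × List Int) _ =>
        (st.1 ++ [List.zipWith (· + ·) st.2 base], List.zipWith (· + ·) st.2 base))
      ([base], base)).1
    = [base] ++ (List.range l.length).map (fun t => pvRow base (0 + 1 + t)) := by
  have h0 : pvRow base 0 = base := by simp [pvRow]
  have h := pv_fold_rows base l [pvRow base 0] 0
  rw [h0] at h
  rw [h]

-- ===== VERDICT =====
theorem cria_matriz_spec : Claim_equal_cria_matriz := by
  intro m n _
  show cria_matriz m n = cria_matriz_alt m n
  unfold cria_matriz cria_matriz_alt
  by_cases hm : m > 0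
  · simp only [hm, if_true]
    rw [pv_foldl_push, pv_fold_rows0]
    simp only [List.nil_append]
    rw [PySem.List.pyRange_one 0 m, PySem.List.length_pyRange_one]
    have hmt : (m - 0).toNat = ((m - 1 - 0).toNat + 1) := by omega
    rw [hmt, List.range_succ_eq_map]
    simp only [List.map_cons, List.map_map, List.singleton_append]
    congr 1
    · -- first row: A's row 0 equals the base row
      rw [pv_foldl_push]
      simp only [List.nil_append]
      rw [PySem.List.pyRange_one 0 n, PySem.List.pyRange_one 1 (n + 1)]
      simp only [List.map_map]
      have : (n - 0).toNat = (n + 1 - 1).toNat := by omega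
      rw [this]
      apply List.map_congr_left
      intro k _
      simp only [Function.comp_def]
      push_cast
      ring
    · apply List.map_congr_left
      intro t ht
      simp only [Function.comp]
      rw [pv_foldl_push]
      simp only [List.nil_append, pvRow]
      rw [PySem.List.pyRange_one 0 n, PySem.List.pyRange_one 1 (n + 1)]
      simp only [List.map_map]
      have : (n - 0).toNat = (n + 1 - 1).toNat := by omega
      rw [this]
      apply List.map_congr_left
      intro k _
      simp only [Function.comp_def]
      push_cast
      ring
  · simp only [hm, if_false]
    have : PySem.List.pyRange 0 m 1 = [] := PySem.List.pyRange_one_eq_nil (by omega)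
    simp [this]
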